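-- pv_equiv track=rewrite | github.com/MrBrantCode/unitest_baseline | mut_generate/mist_train_cf/cf_87226/solution.py | get_character
-- ===== SOURCE A (Python) =====
-- def get_character(string, index):
--     if index < 0 or index >= len(string):
--         return "Error: Index out of range"
--
--     left = 0
--     right = len(string) - 1
--
--     while left <= right:
--         mid = (left + right) // 2
--
--         if mid == index:
--             return string[mid]
--         elif mid > index:
--             right = mid - 1
--         else:
--             left = mid + 1
--
--     return "Error: Index out of range"
-- ===== SOURCE B (Python) =====
-- def get_character(string, index):
--     if 0 <= index < len(string):
--         return string[index]
--     return "Error: Index out of range"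
-- ===== Notes on version B (the rewrite author's own statement) =====
-- stated objective: simpler
-- what changed: Replaced the binary search for the index with a single guarded direct string access; no loop or left/right/mid bookkeeping remains.
import Mathlib
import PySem

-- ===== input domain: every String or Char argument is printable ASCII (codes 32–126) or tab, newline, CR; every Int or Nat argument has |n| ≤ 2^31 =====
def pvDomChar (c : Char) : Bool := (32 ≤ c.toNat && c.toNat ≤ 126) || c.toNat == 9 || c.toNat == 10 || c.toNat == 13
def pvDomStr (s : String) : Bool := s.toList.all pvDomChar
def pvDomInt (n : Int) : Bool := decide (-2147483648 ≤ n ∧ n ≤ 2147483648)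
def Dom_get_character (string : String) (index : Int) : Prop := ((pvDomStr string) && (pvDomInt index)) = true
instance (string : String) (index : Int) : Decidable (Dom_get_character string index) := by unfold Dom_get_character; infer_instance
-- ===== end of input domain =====

-- B replaces A's binary search over index positions by one guarded direct access (objective: simpler).

-- ===== PORT A =====
-- A's while-loop, state (left, right); fuel is only a totality guard: the interval
-- shrinks each iteration, so fuel = initial interval size + 1 is never exhausted.
def getCharLoop (cs : List Char) (index : Int) : Nat → Int → Int → String
  | 0, _, _ => "Error: Index out of range"
  | fuel + 1, left, right =>
    if left ≤ right then
      let mid := PySem.Int.floordiv (left + right) 2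
      if mid = index then
        -- string[mid]: in range whenever A reaches it (outer guard); pyGetD is exact there
        String.ofList [PySem.List.pyGetD cs mid ' ']
      else if mid > index then
        getCharLoop cs index fuel left (mid - 1)
      else
        getCharLoop cs index fuel (mid + 1) right
    else "Error: Index out of range"

def get_character (string : String) (index : Int) : String :=
  if index < 0 ∨ index ≥ PySem.Str.len string then "Error: Index out of range"
  else getCharLoop string.toList index (string.toList.length + 1) 0 (PySem.Str.len string - 1)

-- ===== PORT B =====
def get_character_alt (string : String) (index : Int) : String :=
  if 0 ≤ index ∧ index < PySem.Str.len string then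
    -- string[index]: in range by the guard; pyGetD is exact there
    String.ofList [PySem.List.pyGetD string.toList index ' ']
  else "Error: Index out of range"

-- ===== PRECONDITION & SPEC =====
def Spec_get_character (string : String) (index : Int) (out : String) : Prop := out = get_character_alt string index
instance (string : String) (index : Int) (out : String) : Decidable (Spec_get_character string index out) := by unfold Spec_get_character; infer_instance

-- ===== CLAIM (what is proved, stated in full; the proofs are below) =====
def Claim_equal_get_character : Prop := ∀ (string : String) (index : Int), Dom_get_character string index → Spec_get_character string index (get_character string index)

-- ===== LEMMAS AND PROOFS =====
-- A's binary search yields exactly string[index] whenever left ≤ index ≤ right and fuel covers the interval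
lemma getCharLoop_eq (cs : List Char) (index : Int) :
    ∀ (fuel : Nat) (left right : Int),
    left ≤ index → index ≤ right → right + 1 - left ≤ fuel →
    getCharLoop cs index fuel left right = String.ofList [PySem.List.pyGetD cs index ' '] := by
  intro fuel
  induction fuel with
  | zero => intro left right h2 h3 hf; omega
  | succ n ih =>
    intro left right h2 h3 hf
    have hlr : left ≤ right := le_trans h2 h3
    have hmid := PySem.Int.floordiv_two_mid_bounds (lo := left) (hi := right) hlr
    rw [getCharLoop, if_pos hlr]
    by_cases he : PySem.Int.floordiv (left + right) 2 = index
    · rw [if_pos he, he]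
    · rw [if_neg he]
      by_cases hg : PySem.Int.floordiv (left + right) 2 > index
      · rw [if_pos hg]
        exact ih left (PySem.Int.floordiv (left + right) 2 - 1) h2 (by omega) (by omega)
      · rw [if_neg hg]
        exact ih (PySem.Int.floordiv (left + right) 2 + 1) right (by omega) h3 (by omega)

-- ===== VERDICT (by name: the statement is the Claim_ definition above) =====
theorem get_character_spec : Claim_equal_get_character := by
  intro string index _
  unfold Spec_get_character get_character get_character_alt
  have hlen := PySem.Str.len_eq string
  by_cases h : index < 0 ∨ index ≥ PySem.Str.len string
  · rw [if_pos h, if_neg (show ¬ (0 ≤ index ∧ index < PySem.Str.len string) by omega)]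
  · rw [if_neg h, if_pos (show 0 ≤ index ∧ index < PySem.Str.len string by omega)]
    exact getCharLoop_eq string.toList index (string.toList.length + 1) 0
      (PySem.Str.len string - 1) (by omega) (by omega) (by omega)
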